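-- pv_equiv track=rewrite | github.com/btyu/MidiProcessor | midi_processing.py | generate_duration_vocab
-- ===== SOURCE A (Python) =====
-- def generate_duration_vocab(max_duration, pos_resolution):
--     dur_enc = list()
--     dur_dec = list()
--     for i in range(max_duration):
--         for j in range(pos_resolution):
--             dur_dec.append(len(dur_enc))
--             for k in range(2 ** i):
--                 dur_enc.append(len(dur_dec) - 1)
--     return dur_enc, dur_dec
-- ===== SOURCE B (Python) =====
-- def generate_duration_vocab(max_duration, pos_resolution):
--     # closed-form decode table
--     dur_dec = [pos_resolution * (2 ** i - 1) + j * 2 ** i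
--                for i in range(max_duration)
--                for j in range(pos_resolution)]
--     # encode table: class index i*pos_resolution+j repeated 2**i times
--     dur_enc = []
--     for i in range(max_duration):
--         for j in range(pos_resolution):
--             dur_enc += [i * pos_resolution + j] * 2 ** i
--     return dur_enc, dur_dec
-- ===== Notes on version B (the rewrite author's own statement) =====
-- stated objective: simpler
-- what changed: Decouples the two lists: dur_dec is computed by the closed form pos_resolution*(2**i-1)+j*2**i instead of reading len(dur_enc), and dur_enc is built in an independent pass by extending with [i*pos_resolution+j]*2**i instead of appending len(dur_dec)-1 one element at a time.
import Mathlib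
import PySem

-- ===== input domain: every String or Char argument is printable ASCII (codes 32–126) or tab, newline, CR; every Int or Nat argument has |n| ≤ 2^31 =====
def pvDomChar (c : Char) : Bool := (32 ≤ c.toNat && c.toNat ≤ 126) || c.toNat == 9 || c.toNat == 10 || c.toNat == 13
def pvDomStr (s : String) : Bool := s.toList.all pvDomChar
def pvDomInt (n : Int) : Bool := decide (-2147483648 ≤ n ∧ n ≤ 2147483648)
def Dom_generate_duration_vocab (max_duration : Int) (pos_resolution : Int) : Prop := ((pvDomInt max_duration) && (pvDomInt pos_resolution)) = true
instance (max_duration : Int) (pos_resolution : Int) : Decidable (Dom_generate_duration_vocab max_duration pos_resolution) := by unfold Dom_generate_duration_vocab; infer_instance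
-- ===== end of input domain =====

-- B decouples the two lists: dur_dec by the closed form pr*(2^i-1)+j*2^i, dur_enc by an
-- independent pass extending with the class index repeated 2^i times (objective: simpler).

-- ===== PORT A =====
def generate_duration_vocab (max_duration : Int) (pos_resolution : Int) : List Int × List Int :=
  (PySem.List.pyRange 0 max_duration 1).foldl (fun st i =>
    (PySem.List.pyRange 0 pos_resolution 1).foldl (fun st _j =>
      let st1 : List Int × List Int := (st.1, st.2 ++ [(st.1.length : Int)])
      (PySem.List.pyRange 0 ((2:Int) ^ i.toNat) 1).foldl (fun st _k =>
        (st.1 ++ [(st.2.length : Int) - 1], st.2)) st1) st) (([], []) : List Int × List Int)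

-- ===== PORT B =====
def generate_duration_vocab_alt (max_duration : Int) (pos_resolution : Int) : List Int × List Int :=
  let dur_dec := (PySem.List.pyRange 0 max_duration 1).flatMap (fun i =>
    (PySem.List.pyRange 0 pos_resolution 1).map (fun j =>
      pos_resolution * ((2:Int) ^ i.toNat - 1) + j * (2:Int) ^ i.toNat))
  let dur_enc := (PySem.List.pyRange 0 max_duration 1).foldl (fun acc i =>
    (PySem.List.pyRange 0 pos_resolution 1).foldl (fun acc j =>
      acc ++ List.replicate (2 ^ i.toNat) (i * pos_resolution + j)) acc) ([] : List Int)
  (dur_enc, dur_dec)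

-- ===== PRECONDITION & SPEC =====
def Spec_generate_duration_vocab (max_duration : Int) (pos_resolution : Int) (out : List Int × List Int) : Prop := out = generate_duration_vocab_alt max_duration pos_resolution
instance (max_duration : Int) (pos_resolution : Int) (out : List Int × List Int) : Decidable (Spec_generate_duration_vocab max_duration pos_resolution out) := by unfold Spec_generate_duration_vocab; infer_instance

-- ===== CLAIM (what is proved, stated in full; the proofs are below) =====
def Claim_equal_generate_duration_vocab : Prop := ∀ (max_duration : Int) (pos_resolution : Int), Dom_generate_duration_vocab max_duration pos_resolution → Spec_generate_duration_vocab max_duration pos_resolution (generate_duration_vocab max_duration pos_resolution)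

-- ===== LEMMAS AND PROOFS =====

-- A's innermost k-loop appends the constant len(dec)-1 count times.
theorem pv_kloop (c : Nat) (enc dec : List Int) :
    (PySem.List.pyRange 0 (c : Int) 1).foldl
      (fun st _k => (st.1 ++ [(st.2.length : Int) - 1], st.2)) (enc, dec)
    = (enc ++ List.replicate c ((dec.length : Int) - 1), dec) := by
  induction c generalizing enc with
  | zero => simp [PySem.List.pyRange_one_eq_nil]
  | succ c ih =>
      rw [show ((c + 1 : Nat) : Int) = (c : Int) + 1 by push_cast; ring,
          PySem.List.pyRange_one_succ_right (by positivity), List.foldl_append, ih]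
      simp [List.replicate_succ', List.append_assoc]

-- A's middle j-loop, over an arbitrary starting state.
theorem pv_jloop (e : Nat) (m : Nat) (enc dec : List Int) :
    (PySem.List.pyRange 0 (m : Int) 1).foldl (fun st _j =>
        (PySem.List.pyRange 0 ((2 ^ e : Nat) : Int) 1).foldl (fun st _k =>
          (st.1 ++ [(st.2.length : Int) - 1], st.2)) (st.1, st.2 ++ [(st.1.length : Int)])) (enc, dec)
    = (enc ++ (PySem.List.pyRange 0 (m : Int) 1).flatMap
          (fun j => List.replicate (2 ^ e) ((dec.length : Int) + j)),
       dec ++ (PySem.List.pyRange 0 (m : Int) 1).map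
          (fun j => (enc.length : Int) + j * (2:Int) ^ e)) := by
  induction m with
  | zero => simp [PySem.List.pyRange_one_eq_nil]
  | succ m ih =>
      rw [show ((m + 1 : Nat) : Int) = (m : Int) + 1 by push_cast; ring,
          PySem.List.pyRange_one_succ_right (by positivity), List.foldl_append, ih]
      simp only [List.foldl_cons, List.foldl_nil, pv_kloop, List.flatMap_append, List.map_append]
      refine Prod.ext ?_ ?_
      · simp only [List.flatMap_singleton, List.append_assoc]
        refine congrArg _ (congrArg _ (congrArg _ ?_))
        simp [List.length_flatMap]
        ring
      · simp only [List.map_singleton, List.append_assoc]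
        refine congrArg _ (congrArg _ (congrArg (fun z => [z]) ?_))
        simp [List.length_flatMap]

-- generic shape of B's inner j-fold
theorem pv_bj (pr : Int) (e : Nat) (i : Int) (acc : List Int) :
    (PySem.List.pyRange 0 pr 1).foldl
      (fun acc j => acc ++ List.replicate (2 ^ e) (i * pr + j)) acc
    = acc ++ (PySem.List.pyRange 0 pr 1).flatMap
        (fun j => List.replicate (2 ^ e) (i * pr + j)) :=
  PySem.List.foldl_append_eq_flatMap _ _ _

theorem pv_outer (pr : Int) (hpr : 0 < pr) (n : Nat) :
    ((PySem.List.pyRange 0 (n : Int) 1).foldl (fun st i =>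
      (PySem.List.pyRange 0 pr 1).foldl (fun st _j =>
        let st1 : List Int × List Int := (st.1, st.2 ++ [(st.1.length : Int)])
        (PySem.List.pyRange 0 ((2:Int) ^ i.toNat) 1).foldl (fun st _k =>
          (st.1 ++ [(st.2.length : Int) - 1], st.2)) st1) st) (([], []) : List Int × List Int)
    = ((PySem.List.pyRange 0 (n : Int) 1).foldl (fun acc i =>
          (PySem.List.pyRange 0 pr 1).foldl (fun acc j =>
            acc ++ List.replicate (2 ^ i.toNat) (i * pr + j)) acc) ([] : List Int),
       (PySem.List.pyRange 0 (n : Int) 1).flatMap (fun i =>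
          (PySem.List.pyRange 0 pr 1).map (fun j =>
            pr * ((2:Int) ^ i.toNat - 1) + j * (2:Int) ^ i.toNat))))
    ∧ (((PySem.List.pyRange 0 (n : Int) 1).foldl (fun acc i =>
          (PySem.List.pyRange 0 pr 1).foldl (fun acc j =>
            acc ++ List.replicate (2 ^ i.toNat) (i * pr + j)) acc) ([] : List Int)).length : Int)
        = pr * ((2:Int) ^ n - 1)
    ∧ (((PySem.List.pyRange 0 (n : Int) 1).flatMap (fun i =>
          (PySem.List.pyRange 0 pr 1).map (fun j =>
            pr * ((2:Int) ^ i.toNat - 1) + j * (2:Int) ^ i.toNat))).length : Int)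
        = (n : Int) * pr := by
  lift pr to Nat using hpr.le with p
  induction n with
  | zero => simp [PySem.List.pyRange_one_eq_nil]
  | succ n ih =>
      obtain ⟨hA, hE, hD⟩ := ih
      rw [show ((n + 1 : Nat) : Int) = (n : Int) + 1 by push_cast; ring]
      simp only [PySem.List.pyRange_one_succ_right (show (0:Int) ≤ (n:Int) by positivity),
        List.foldl_append, List.foldl_cons, List.foldl_nil, List.flatMap_append,
        List.flatMap_singleton, hA, Int.toNat_natCast]
      rw [show ((2:Int) ^ n) = ((2 ^ n : Nat) : Int) by push_cast; ring] at *
      rw [pv_jloop n p, pv_bj, hD, hE]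
      refine ⟨?_, ?_, ?_⟩
      · push_cast
        rfl
      · simp only [List.length_append, List.length_flatMap, List.length_replicate, List.map_const']
        push_cast
        rw [hE]
        simp [PySem.List.length_pyRange_one]
        ring
      · simp only [List.length_append, List.length_map]
        push_cast
        rw [hD]
        simp [PySem.List.length_pyRange_one]
        ring

-- ===== VERDICT (by name: the statement is the Claim_ definition above) =====
theorem generate_duration_vocab_spec : Claim_equal_generate_duration_vocab := by
  intro md pr _
  unfold Spec_generate_duration_vocab generate_duration_vocab generate_duration_vocab_alt
  by_cases hpr : 0 < pr
  · by_cases hmd : 0 < md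
    · have h := (pv_outer pr hpr md.toNat).1
      rw [Int.toNat_of_nonneg hmd.le] at h
      exact h
    · simp [PySem.List.pyRange_one_eq_nil (le_of_not_gt hmd)]
  · simp [PySem.List.pyRange_one_eq_nil (le_of_not_gt hpr)]
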